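-- pv_equiv track=rewrite | github.com/InferenceOverload/agent-dev-assistence-model | src/tools/path_resolver.py | resolve_paths
-- ===== SOURCE A (Python) =====
-- from typing import Iterable, List
--
-- def resolve_paths(candidates: Iterable[str], repo_files: Iterable[str]) -> List[str]:
--     """
--     Normalize candidate paths against actual repo files.
--     Strategy:
--       - prefer exact match
--       - else match by suffix (e.g., 'client/src/App.js' or 'App.js')
--       - dedupe
--     """
--     repo = list(repo_files or [])
--     out: List[str] = []
--     seen = set()
--     cand_list = list(dict.fromkeys([c.strip() for c in candidates or [] if c and c.strip()]))
--     for c in cand_list: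
--         # exact
--         if c in repo and c not in seen:
--             out.append(c); seen.add(c); continue
--         # suffix
--         matches = [rf for rf in repo if rf.endswith(c)]
--         if matches:
--             # choose the longest path (most specific)
--             best = max(matches, key=len)
--             if best not in seen:
--                 out.append(best); seen.add(best)
--     return out
-- ===== SOURCE B (Python) =====
-- from typing import Iterable, List
--
-- def resolve_paths(candidates: Iterable[str], repo_files: Iterable[str]) -> List[str]:
--     """Same behaviour, but the per-candidate repo scan is replaced by a
--     precomputed suffix index: for every suffix of every repo file, remember
--     the first repo file of maximal length ending with that suffix."""
--     repo = list(repo_files or [])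
--     repo_set = set(repo)
--     index = {}
--     for rf in repo:
--         n = len(rf)
--         for i in range(n + 1):
--             s = rf[i:]
--             cur = index.get(s)
--             if cur is None or len(cur) < n:
--                 index[s] = rf
--     out: List[str] = []
--     seen = set()
--     for c in dict.fromkeys(c.strip() for c in (candidates or []) if c and c.strip()):
--         if c in repo_set and c not in seen:
--             out.append(c)
--             seen.add(c)
--             continue
--         best = index.get(c)
--         if best is not None and best not in seen:
--             out.append(best)
--             seen.add(best)
--     return out
-- ===== Notes on version B (the rewrite author's own statement) =====
-- stated objective: faster
-- what changed: B precomputes a repo set for exact matches and a one-pass suffix index (every suffix of every repo file mapped to the first longest file ending with it), so A's per-candidate repo scan and max-by-length pass are replaced by two dictionary lookups per candidate.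
import Mathlib
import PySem

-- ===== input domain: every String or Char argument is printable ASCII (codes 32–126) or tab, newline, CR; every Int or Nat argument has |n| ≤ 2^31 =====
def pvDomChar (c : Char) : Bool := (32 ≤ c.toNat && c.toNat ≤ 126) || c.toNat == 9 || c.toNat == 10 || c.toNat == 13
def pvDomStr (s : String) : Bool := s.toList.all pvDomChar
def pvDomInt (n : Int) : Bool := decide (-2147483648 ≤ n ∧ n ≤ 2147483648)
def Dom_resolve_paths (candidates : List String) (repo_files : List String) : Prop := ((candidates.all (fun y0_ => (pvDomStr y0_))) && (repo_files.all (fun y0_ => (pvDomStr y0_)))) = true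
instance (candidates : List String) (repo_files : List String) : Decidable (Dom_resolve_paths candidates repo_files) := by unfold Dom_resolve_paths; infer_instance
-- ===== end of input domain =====

-- B replaces A's per-candidate scan of the repo (exact-membership scan + suffix scan with max-by-length)
-- by a per-repo set plus a suffix index built once: suffix -> first longest repo file ending with it.


-- ===== PORT A =====
-- cand_list = list(dict.fromkeys([c.strip() for c in candidates or [] if c and c.strip()]))
def pvCandList (candidates : List String) : List String :=
  PySem.List.dedup
    ((candidates.filter (fun c => !(c == "") && !(PySem.Str.strip c == ""))).map
      (fun c => PySem.Str.strip c))

def resolve_paths (candidates : List String) (repo_files : List String) : List String :=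
  let repo := repo_files
  ((pvCandList candidates).foldl
    (fun (st : List String × PySem.Set String) c =>
      -- exact
      if repo.contains c && !(PySem.Set.contains st.2 c) then
        (st.1 ++ [c], PySem.Set.add st.2 c)
      else
        -- suffix
        let ms := repo.filter (fun rf => PySem.Str.endswith rf c)
        match PySem.List.max? ms (fun rf => PySem.Str.len rf) with
        | none => st
        | some best =>
          if PySem.Set.contains st.2 best then st
          else (st.1 ++ [best], PySem.Set.add st.2 best))
    ([], PySem.Set.empty)).1

-- ===== PORT B =====
-- index: for every suffix s of rf (rf[i:] for i in range(len(rf)+1)):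
--   if index.get(s) is None or len(index[s]) < len(rf): index[s] = rf
def pvSuffixIndex (repo : List String) : PySem.Dict String String :=
  repo.foldl
    (fun idx rf =>
      let n := PySem.Str.len rf
      (PySem.List.pyRange 0 (n + 1)).foldl
        (fun idx i =>
          let s := PySem.Str.slice rf (some i) none
          match idx.get? s with
          | none => idx.insert s rf
          | some cur => if PySem.Str.len cur < n then idx.insert s rf else idx)
        idx)
    PySem.Dict.empty

def resolve_paths_alt (candidates : List String) (repo_files : List String) : List String :=
  let repo := repo_files
  let repoSet : PySem.Set String := PySem.Set.ofList repo
  let index := pvSuffixIndex repo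
  ((pvCandList candidates).foldl
    (fun (st : List String × PySem.Set String) c =>
      if PySem.Set.contains repoSet c && !(PySem.Set.contains st.2 c) then
        (st.1 ++ [c], PySem.Set.add st.2 c)
      else
        match index.get? c with
        | none => st
        | some best =>
          if PySem.Set.contains st.2 best then st
          else (st.1 ++ [best], PySem.Set.add st.2 best))
    ([], PySem.Set.empty)).1

-- ===== PRECONDITION & SPEC =====
def Spec_resolve_paths (candidates : List String) (repo_files : List String) (out : List String) : Prop := out = resolve_paths_alt candidates repo_files
instance (candidates : List String) (repo_files : List String) (out : List String) : Decidable (Spec_resolve_paths candidates repo_files out) := by unfold Spec_resolve_paths; infer_instance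

-- ===== CLAIM (what is proved, stated in full; the proofs are below) =====
def Claim_equal_resolve_paths : Prop := ∀ (candidates : List String) (repo_files : List String), Dom_resolve_paths candidates repo_files → Spec_resolve_paths candidates repo_files (resolve_paths candidates repo_files)

-- ===== LEMMAS AND PROOFS =====

-- exact membership: 'c in set(repo)' = 'c in repo'
theorem pv_set_contains (repo : List String) (c : String) :
    PySem.Set.contains (PySem.Set.ofList repo) c = repo.contains c := by
  have h := PySem.Set.mem_ofList repo c
  simp [PySem.Set.contains, h]

-- one repo file absorbed into the index updates exactly the keys that are its suffixes,
-- each with the 'keep the longer (first on ties)' rule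
theorem pv_inner (rf : String) (n : Int) (il : List Int)
    (hnd : (il.map (fun i => PySem.Str.slice rf (some i) none)).Nodup)
    (idx : PySem.Dict String String) (c : String) :
    ((il.foldl
        (fun idx i =>
          let s := PySem.Str.slice rf (some i) none
          match idx.get? s with
          | none => idx.insert s rf
          | some cur => if PySem.Str.len cur < n then idx.insert s rf else idx)
        idx).get? c) =
      if il.any (fun i => PySem.Str.slice rf (some i) none == c) then
        (match idx.get? c with
         | none => some rf
         | some cur => if PySem.Str.len cur < n then some rf else some cur)
      else idx.get? c := by
  induction il generalizing idx with
  | nil => simp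
  | cons i0 tl ih =>
    simp only [List.map_cons, List.nodup_cons, List.mem_map, not_exists, not_and] at hnd
    obtain ⟨hni, hndtl⟩ := hnd
    have hstep : ∀ (d : PySem.Dict String String),
        ((match d.get? (PySem.Str.slice rf (some i0) none) with
          | none => d.insert (PySem.Str.slice rf (some i0) none) rf
          | some cur => if PySem.Str.len cur < n then d.insert (PySem.Str.slice rf (some i0) none) rf else d).get? c) =
        if PySem.Str.slice rf (some i0) none = c then
          (match d.get? c with
           | none => some rf
           | some cur => if PySem.Str.len cur < n then some rf else some cur)
        else d.get? c := by
      intro d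
      by_cases hc : PySem.Str.slice rf (some i0) none = c
      · rw [if_pos hc, hc]
        cases h : d.get? c with
        | none => simp [PySem.Dict.get?_insert_self]
        | some cur =>
          simp only
          split_ifs with hl
          · simp [PySem.Dict.get?_insert_self]
          · exact h
      · rw [if_neg hc]
        cases h : d.get? (PySem.Str.slice rf (some i0) none) with
        | none => simp [PySem.Dict.get?_insert, Ne.symm, hc]
        | some cur =>
          simp only
          split_ifs with hl
          · simp [PySem.Dict.get?_insert, Ne.symm, hc]
          · rfl
    simp only [List.foldl_cons, List.any_cons]
    rw [ih hndtl, hstep idx]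
    by_cases hc : PySem.Str.slice rf (some i0) none = c
    · have htl : (tl.any fun i => PySem.Str.slice rf (some i) none == c) = false := by
        rw [List.any_eq_false]
        intro i hi he
        rw [beq_iff_eq] at he
        exact hni i hi (by rw [he, hc])
      simp [htl, hc]
    · simp [hc]

-- the suffixes of rf, as slice strings over range(len(rf)+1)
theorem pv_range (rf : String) :
    PySem.List.pyRange 0 (PySem.Str.len rf + 1) =
      (List.range (rf.toList.length + 1)).map (fun k : Nat => (k : Int)) := by
  have h : PySem.Str.len rf + 1 = ((rf.toList.length + 1 : Nat) : Int) := by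
    rw [PySem.Str.len_eq]; push_cast; ring
  rw [h, PySem.List.pyRange_zero_natCast]

theorem pv_slice_toList (rf : String) (k : Nat) :
    (PySem.Str.slice rf (some (k : Int)) none).toList = rf.toList.drop k := by
  rw [PySem.Str.toList_slice, PySem.Chars.slice_eq_listSlice, PySem.List.slice_from_natCast]

theorem pv_nodup (rf : String) :
    (((List.range (rf.toList.length + 1)).map (fun k : Nat => (k : Int))).map
      (fun i => PySem.Str.slice rf (some i) none)).Nodup := by
  rw [List.map_map]
  apply List.Nodup.map_on _ List.nodup_range
  intro x hx y hy h
  simp only [List.mem_range] at hx hy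
  have := congrArg (fun s : String => s.toList.length) h
  simp only [Function.comp_apply, pv_slice_toList, List.length_drop] at this
  omega

theorem pv_any (rf c : String) :
    (((List.range (rf.toList.length + 1)).map (fun k : Nat => (k : Int))).any
      (fun i => PySem.Str.slice rf (some i) none == c)) = PySem.Str.endswith rf c := by
  rw [PySem.Str.endswith]
  rcases h : PySem.Chars.endswith rf.toList c.toList with _ | _
  · rw [List.any_eq_false]
    intro i hi
    simp only [List.mem_map, List.mem_range] at hi
    obtain ⟨k, hk, rfl⟩ := hi
    intro he
    rw [beq_iff_eq] at he
    have hsuf : c.toList <:+ rf.toList := by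
      rw [← he, pv_slice_toList]
      exact List.drop_suffix k rf.toList
    rw [(PySem.Chars.endswith_iff rf.toList c.toList).mpr hsuf] at h
    exact absurd h (by decide)
  · rw [List.any_eq_true]
    have hsuf : c.toList <:+ rf.toList := (PySem.Chars.endswith_iff rf.toList c.toList).mp h
    refine ⟨((rf.toList.length - c.toList.length : Nat) : Int), ?_, ?_⟩
    · simp only [List.mem_map, List.mem_range]
      exact ⟨rf.toList.length - c.toList.length, by omega, rfl⟩
    · rw [beq_iff_eq]
      apply String.toList_inj.mp
      rw [pv_slice_toList]
      exact (List.suffix_iff_eq_drop.mp hsuf).symm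

theorem pv_index_get (repo : List String) (c : String) :
    (pvSuffixIndex repo).get? c =
      PySem.List.max? (repo.filter (fun rf => PySem.Str.endswith rf c))
        (fun rf => PySem.Str.len rf) := by
  induction repo using List.reverseRecOn with
  | nil => simp [pvSuffixIndex, PySem.List.max?, PySem.Dict.get?_empty]
  | append_singleton repo rf ih =>
    have hfold : pvSuffixIndex (repo ++ [rf]) =
        (PySem.List.pyRange 0 (PySem.Str.len rf + 1)).foldl
          (fun idx i =>
            let s := PySem.Str.slice rf (some i) none
            match idx.get? s with
            | none => idx.insert s rf
            | some cur => if PySem.Str.len cur < PySem.Str.len rf then idx.insert s rf else idx)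
          (pvSuffixIndex repo) := by
      simp [pvSuffixIndex, List.foldl_append]
    rw [hfold, pv_range, pv_inner rf (PySem.Str.len rf) _ (pv_nodup rf) _ c, pv_any, ih]
    simp only [PySem.List.max?, List.filter_append, List.foldl_append, List.filter_cons,
      List.filter_nil]
    rcases hew : PySem.Str.endswith rf c with _ | _
    · simp
    · simp only [if_true]
      rw [List.foldl_cons, List.foldl_nil]
      split <;> rename_i hm <;> rw [hm]

-- ===== VERDICT (by name: the statement is the Claim_ definition above) =====
theorem resolve_paths_spec : Claim_equal_resolve_paths := by
  intro candidates repo_files _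
  unfold Spec_resolve_paths resolve_paths resolve_paths_alt
  simp only
  congr 1
  apply PySem.List.foldl_congr_mem
  intro st c _
  rw [pv_set_contains, pv_index_get]
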